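-- pv_equiv track=rewrite | github.com/hite77/Advent_of_code_2019_python | src/day4.py | contains_double_matches
-- ===== SOURCE A (Python) =====
-- def contains_double_matches(number):
--     string_number = str(number)
--     for x in range(0, len(string_number)-1):
--         if string_number[x] == string_number[x + 1]:
--             valid = True
--             if x > 0 and string_number[x-1] == string_number[x]:
--                 valid = False
--             if x + 2 < len(string_number) and string_number[x+2] == string_number[x]:
--                 valid = False
--             if valid:
--                 return True
--     return False
-- ===== SOURCE B (Python) =====
-- from itertools import groupby
--
--
-- def contains_double_matches(number):
--     return any(sum(1 for _ in group) == 2 for _, group in groupby(str(number)))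
-- ===== Notes on version B (the rewrite author's own statement) =====
-- stated objective: idiomatic
-- what changed: Replaces the index loop with neighbor comparisons and validity flags by grouping consecutive equal digits with itertools.groupby and testing whether any run has length exactly 2.
import Mathlib
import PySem

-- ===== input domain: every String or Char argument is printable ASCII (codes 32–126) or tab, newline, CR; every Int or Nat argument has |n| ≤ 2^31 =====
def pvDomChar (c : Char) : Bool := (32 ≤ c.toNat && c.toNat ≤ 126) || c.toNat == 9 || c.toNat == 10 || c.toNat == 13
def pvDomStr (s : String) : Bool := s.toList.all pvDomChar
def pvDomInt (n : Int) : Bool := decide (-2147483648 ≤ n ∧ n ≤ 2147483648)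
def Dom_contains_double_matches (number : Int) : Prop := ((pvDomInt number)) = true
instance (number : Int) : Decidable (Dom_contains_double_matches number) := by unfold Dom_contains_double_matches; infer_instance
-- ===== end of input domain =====

-- B replaces A's index loop with validity flags by a run-length decomposition
-- (groupby then "any run of length exactly 2"); idiomatic, same cost.


-- ===== PORT A =====
-- A scans indices x of str(number): on a neighbor match s[x] = s[x+1] it checks the
-- chars just before and just after the pair ("valid" flags) and returns True if both differ.
def contains_double_matches (number : Int) : Bool :=
  let s := PySem.Int.toChars number
  (PySem.List.pyRange 0 ((s.length : Int) - 1)).any (fun x =>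
    if PySem.List.pyGet? s x = PySem.List.pyGet? s (x + 1) then
      let valid := true
      let valid := if 0 < x ∧ PySem.List.pyGet? s (x - 1) = PySem.List.pyGet? s x then false else valid
      let valid := if x + 2 < (s.length : Int) ∧ PySem.List.pyGet? s (x + 2) = PySem.List.pyGet? s x then false else valid
      valid
    else false)

-- ===== PORT B =====
-- length of the leading run of `c` in the list, and the remainder after that run (groupby's group)
def pvRun (c : Char) : List Char → Nat × List Char
  | [] => (0, [])
  | d :: t => if d = c then let p := pvRun c t; (p.1 + 1, p.2) else (0, d :: t)

theorem pvRun_snd_le (c : Char) (t : List Char) : (pvRun c t).2.length ≤ t.length := by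
  induction t with
  | nil => simp [pvRun]
  | cons d u ih =>
    by_cases h : d = c
    · simp [pvRun, h]
      omega
    · simp [pvRun, h]

-- any run of consecutive equal chars has length exactly 2?
def pvHasRun2 : List Char → Bool
  | [] => false
  | c :: t =>
    let p := pvRun c t
    if p.1 + 1 = 2 then true else pvHasRun2 p.2
termination_by s => s.length
decreasing_by have := pvRun_snd_le c t; simp; omega

def contains_double_matches_alt (number : Int) : Bool :=
  pvHasRun2 (PySem.Int.toChars number)

-- ===== PRECONDITION & SPEC =====
def Spec_contains_double_matches (number : Int) (out : Bool) : Prop := out = contains_double_matches_alt number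
instance (number : Int) (out : Bool) : Decidable (Spec_contains_double_matches number out) := by unfold Spec_contains_double_matches; infer_instance

-- ===== CLAIM (what is proved, stated in full; the proofs are below) =====
def Claim_equal_contains_double_matches : Prop := ∀ (number : Int), Dom_contains_double_matches number → Spec_contains_double_matches number (contains_double_matches number)

-- ===== LEMMAS AND PROOFS =====

-- per-index predicate of A's loop, generalized by the char `prev` standing in front of the list
def pvP (prev : Option Char) (s : List Char) (x : Int) : Bool :=
  decide (PySem.List.pyGet? s x = PySem.List.pyGet? s (x + 1)) &&
  !decide ((if x = 0 then prev else PySem.List.pyGet? s (x - 1)) = PySem.List.pyGet? s x) &&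
  !decide (PySem.List.pyGet? s (x + 2) = PySem.List.pyGet? s x)

-- A's loop, recursively on the list, carrying the char standing in front
def pvH (prev : Option Char) : List Char → Bool
  | [] => false
  | [_] => false
  | a :: b :: t =>
    (decide (a = b) && !decide (prev = some a) && !decide (t.head? = some a)) ||
    pvH (some a) (b :: t)

theorem pvGet_zero (s : List Char) : PySem.List.pyGet? s 0 = s.head? := by
  rw [show (0 : Int) = ((0 : Nat) : Int) by norm_num, PySem.List.pyGet?_natCast]
  cases s <;> simp

theorem pvGet_shift (a : Char) (s : List Char) (x : Int) (hx : 0 ≤ x) :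
    PySem.List.pyGet? (a :: s) (x + 1) = PySem.List.pyGet? s x := by
  obtain ⟨n, rfl⟩ := Int.eq_ofNat_of_zero_le hx
  rw [show ((n : Nat) : Int) + 1 = ((n + 1 : Nat) : Int) by push_cast; ring,
    PySem.List.pyGet?_natCast, PySem.List.pyGet?_natCast]
  simp

theorem pvP_shift (prev : Option Char) (a : Char) (s : List Char) (k : Nat) :
    pvP prev (a :: s) ((k : Int) + 1) = pvP (some a) s (k : Int) := by
  unfold pvP
  rw [pvGet_shift a s (k : Int) (by omega),
    show ((k : Int) + 1 + 1) = ((k : Int) + 1) + 1 by ring,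
    pvGet_shift a s ((k : Int) + 1) (by omega),
    show ((k : Int) + 1 + 2) = ((k : Int) + 2) + 1 by ring,
    pvGet_shift a s ((k : Int) + 2) (by omega),
    if_neg (by omega : ¬ ((k : Int) + 1 = 0)),
    show ((k : Int) + 1 - 1) = (k : Int) by ring]
  cases k with
  | zero => simp [pvGet_zero]
  | succ j =>
    rw [if_neg (by omega : ¬ (((j + 1 : Nat) : Int) = 0)),
      show (((j + 1 : Nat) : Int)) = ((j : Int) + 1) by push_cast; ring,
      pvGet_shift a s (j : Int) (by omega),
      show ((j : Int) + 1 - 1) = (j : Int) by ring]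

theorem pvP_head (prev : Option Char) (a b : Char) (t : List Char) :
    pvP prev (a :: b :: t) 0 =
      (decide (a = b) && !decide (prev = some a) && !decide (t.head? = some a)) := by
  unfold pvP
  rw [if_pos rfl, pvGet_zero,
    show (0 : Int) + 1 = 0 + 1 by ring, pvGet_shift a (b :: t) 0 le_rfl, pvGet_zero,
    show (0 : Int) + 2 = (0 + 1) + 1 by ring, pvGet_shift a (b :: t) (0 + 1) (by omega),
    show (0 : Int) + 1 = 0 + 1 by ring, pvGet_shift b t 0 le_rfl, pvGet_zero]
  by_cases h : a = b
  · simp [h]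
  · simp [h]

theorem pvP_any_eq_pvH (s : List Char) (prev : Option Char) :
    (PySem.List.pyRange 0 ((s.length : Int) - 1)).any (pvP prev s) = pvH prev s := by
  induction s generalizing prev with
  | nil =>
    simp only [List.length_nil, Nat.cast_zero, zero_sub]
    rw [show PySem.List.pyRange 0 (-1) = [] from by decide]
    rfl
  | cons a s ih =>
    cases s with
    | nil =>
      simp only [List.length_singleton, Nat.cast_one, sub_self]
      rw [show PySem.List.pyRange 0 0 = [] from by decide]
      simp [pvH.eq_def]
    | cons b t =>
      have hlen : ((a :: b :: t).length : Int) - 1 = ((t.length + 1 : Nat) : Int) := by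
        push_cast [List.length_cons]
        ring
      rw [hlen, PySem.List.pyRange_zero_natCast, List.range_succ_eq_map]
      simp only [List.map_cons, List.any_cons, List.map_map, List.any_map]
      have htail : ∀ k ∈ List.range t.length,
          (pvP prev (a :: b :: t) ∘ (fun k : Nat => ((k : Nat) : Int)) ∘ Nat.succ) k
            = (pvP (some a) (b :: t) ∘ fun k : Nat => ((k : Nat) : Int)) k := by
        intro k _
        simp only [Function.comp]
        rw [show ((k.succ : Nat) : Int) = ((k : Nat) : Int) + 1 by push_cast; ring]
        exact pvP_shift prev a (b :: t) k
      rw [PySem.List.any_congr_mem htail]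
      have h2 : (List.range t.length).any (pvP (some a) (b :: t) ∘ fun k : Nat => ((k : Nat) : Int))
          = (PySem.List.pyRange 0 (((b :: t).length : Int) - 1)).any (pvP (some a) (b :: t)) := by
        rw [show (((b :: t).length : Int) - 1) = ((t.length : Nat) : Int) by simp,
          PySem.List.pyRange_zero_natCast, List.any_map]
      rw [h2, ih]
      rw [show (((0 : Nat) : Int)) = (0 : Int) by norm_num, pvP_head]
      rfl

-- bounds facts about pyGet? at nonnegative indices
theorem pvGet_some (s : List Char) (x : Int) (hx0 : 0 ≤ x) (hx1 : x < (s.length : Int)) :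
    ∃ c, PySem.List.pyGet? s x = some c := by
  obtain ⟨n, rfl⟩ := Int.eq_ofNat_of_zero_le hx0
  rw [PySem.List.pyGet?_natCast]
  exact ⟨s[n]'(by exact_mod_cast hx1), List.getElem?_eq_getElem (by exact_mod_cast hx1)⟩

theorem pvGet_none (s : List Char) (x : Int) (hx0 : 0 ≤ x) (hx1 : (s.length : Int) ≤ x) :
    PySem.List.pyGet? s x = none := by
  obtain ⟨n, rfl⟩ := Int.eq_ofNat_of_zero_le hx0
  rw [PySem.List.pyGet?_natCast]
  exact List.getElem?_eq_none (by exact_mod_cast hx1)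

-- A's per-index loop body equals pvP none s on in-range indices
theorem pvA_body_eq (s : List Char) (x : Int) (hx0 : 0 ≤ x) (hx1 : x < (s.length : Int) - 1) :
    (if PySem.List.pyGet? s x = PySem.List.pyGet? s (x + 1) then
      let valid := true
      let valid := if 0 < x ∧ PySem.List.pyGet? s (x - 1) = PySem.List.pyGet? s x then false else valid
      let valid := if x + 2 < (s.length : Int) ∧ PySem.List.pyGet? s (x + 2) = PySem.List.pyGet? s x then false else valid
      valid
    else false) = pvP none s x := by
  obtain ⟨c, hc⟩ := pvGet_some s x hx0 (by omega)
  unfold pvP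
  by_cases h0 : PySem.List.pyGet? s x = PySem.List.pyGet? s (x + 1)
  · rw [if_pos h0, decide_eq_true h0]
    have hg1 : decide ((if x = 0 then (none : Option Char) else PySem.List.pyGet? s (x - 1)) = PySem.List.pyGet? s x)
        = decide (0 < x ∧ PySem.List.pyGet? s (x - 1) = PySem.List.pyGet? s x) := by
      by_cases hz : x = 0
      · subst hz
        rw [if_pos rfl, hc]
        simp
      · rw [if_neg hz]
        apply decide_eq_decide.mpr
        constructor
        · exact fun h => ⟨by omega, h⟩
        · exact fun h => h.2
    have hg2 : decide (PySem.List.pyGet? s (x + 2) = PySem.List.pyGet? s x)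
        = decide (x + 2 < (s.length : Int) ∧ PySem.List.pyGet? s (x + 2) = PySem.List.pyGet? s x) := by
      by_cases h2 : x + 2 < (s.length : Int)
      · apply decide_eq_decide.mpr
        constructor
        · exact fun h => ⟨h2, h⟩
        · exact fun h => h.2
      · rw [pvGet_none s (x + 2) (by omega) (by omega), hc]
        simp
    rw [hg1, hg2]
    split_ifs with hA hB hB <;> simp [hA, hB]
  · rw [if_neg h0, decide_eq_false h0]
    simp

theorem pvRun_of_head_ne (c : Char) (t : List Char) (h : t.head? ≠ some c) : pvRun c t = (0, t) := by
  cases t with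
  | nil => rfl
  | cons d u => simp at h; simp [pvRun, h]

theorem pvRun_snd_head_ne (c : Char) (t : List Char) : (pvRun c t).2.head? ≠ some c := by
  induction t with
  | nil => simp [pvRun]
  | cons d u ih =>
    by_cases h : d = c
    · simp only [pvRun, if_pos h]
      exact ih
    · simp [pvRun, h]

-- chars equal to prev at the head are invisible to pvH
theorem pvH_strip (a : Char) (t : List Char) : pvH (some a) (a :: t) = pvH (some a) t := by
  cases t with
  | nil => rfl
  | cons c u => simp [pvH]

-- pvH (some a) skips over a whole leading run of a's
theorem pvH_skip_run (a : Char) (t : List Char) : pvH (some a) t = pvH (some a) (pvRun a t).2 := by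
  induction t with
  | nil => rfl
  | cons d u ih =>
    by_cases h : d = a
    · subst h; rw [pvH_strip, ih]; simp [pvRun]
    · rw [pvRun_of_head_ne a (d :: u) (by simp [h])]

theorem pvH_eq_pvHasRun2 (n : Nat) : ∀ (s : List Char), s.length ≤ n → ∀ (prev : Option Char),
    (∀ c, s.head? = some c → prev ≠ some c) → pvH prev s = pvHasRun2 s := by
  induction n with
  | zero =>
    intro s hs prev _
    have hnil : s = [] := List.eq_nil_of_length_eq_zero (Nat.le_zero.mp hs)
    subst hnil
    simp [pvH, pvHasRun2]
  | succ n ih =>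
    intro s hs prev hp
    cases s with
    | nil => simp [pvH, pvHasRun2]
    | cons a s' =>
      cases s' with
      | nil => simp [pvH, pvHasRun2, pvRun]
      | cons b t =>
        have hprev : prev ≠ some a := hp a rfl
        by_cases hb : a = b
        · subst hb
          by_cases ht : t.head? = some a
          · -- run of length ≥ 3: A's head test fails (the char after the pair matches),
            -- and both sides reduce to the list after the run
            have hB : pvHasRun2 (a :: a :: t) = pvHasRun2 (pvRun a t).2 := by
              rw [pvHasRun2]
              simp only [pvRun]
              obtain ⟨c, u, rfl⟩ : ∃ c u, t = c :: u := by
                cases t with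
                | nil => simp at ht
                | cons c u => exact ⟨c, u, rfl⟩
              simp only [List.head?_cons, Option.some.injEq] at ht
              subst ht
              simp [pvRun]
            have hA : pvH prev (a :: a :: t) = pvH (some a) (pvRun a t).2 := by
              rw [pvH]
              rw [decide_eq_true ht, show (decide (a = a) && !decide (prev = some a) && !true) = false by simp]
              rw [Bool.false_or, pvH_strip, pvH_skip_run]
            rw [hA, hB]
            exact ih (pvRun a t).2 (le_trans (pvRun_snd_le a t) (by simp at hs; omega)) (some a)
              (fun c hc he => (pvRun_snd_head_ne a t) (by rw [hc]; injection he with he; rw [he]))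
          · -- run of length exactly 2: both sides are true
            have hA : pvH prev (a :: a :: t) = true := by
              rw [pvH]
              simp [hprev, ht]
            have hB : pvHasRun2 (a :: a :: t) = true := by
              rw [pvHasRun2]
              simp [pvRun, pvRun_of_head_ne a t ht]
            rw [hA, hB]
        · -- run of length 1: A's head test fails (no neighbor match at index 0)
          have hA : pvH prev (a :: b :: t) = pvH (some a) (b :: t) := by
            rw [pvH]
            simp [hb]
          have hB : pvHasRun2 (a :: b :: t) = pvHasRun2 (b :: t) := by
            rw [pvHasRun2]
            rw [pvRun_of_head_ne a (b :: t) (by simp; exact fun h => hb h.symm)]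
            norm_num
          rw [hA, hB]
          exact ih (b :: t) (by simp at hs ⊢; omega) (some a)
            (fun c hc he => by simp at hc; subst hc; injection he with he; exact hb he)

-- ===== VERDICT (by name: the statement is the Claim_ definition above) =====
theorem contains_double_matches_spec : Claim_equal_contains_double_matches := by
  intro number _
  unfold Spec_contains_double_matches contains_double_matches contains_double_matches_alt
  set s := PySem.Int.toChars number with hsdef
  simp only []
  have h1 : (PySem.List.pyRange 0 ((s.length : Int) - 1)).any (fun x =>
      if PySem.List.pyGet? s x = PySem.List.pyGet? s (x + 1) then
        let valid := true
        let valid := if 0 < x ∧ PySem.List.pyGet? s (x - 1) = PySem.List.pyGet? s x then false else valid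
        let valid := if x + 2 < (s.length : Int) ∧ PySem.List.pyGet? s (x + 2) = PySem.List.pyGet? s x then false else valid
        valid
      else false) = (PySem.List.pyRange 0 ((s.length : Int) - 1)).any (pvP none s) := by
    apply PySem.List.any_congr_mem
    intro x hx
    rw [PySem.List.mem_pyRange_one] at hx
    exact pvA_body_eq s x hx.1 hx.2
  rw [h1, pvP_any_eq_pvH]
  exact pvH_eq_pvHasRun2 s.length s le_rfl none (fun c _ h => by simp at h)
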